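-- pv_equiv track=rewrite | github.com/mb52598/DU2_CycleGAN | main.py | zip_long
-- ===== SOURCE A (Python) =====
-- from typing import Any, cast, Callable, Iterable, TypeVar
--
-- T1 = TypeVar("T1")
--
-- T2 = TypeVar("T2")
--
-- def zip_long(it1: Iterable[T1], it2: Iterable[T2]) -> Iterable[tuple[T1, T2]]:
--     i1 = iter(it1)
--     i2 = iter(it2)
--     b1 = False
--     b2 = False
--     while True:
--         try:
--             n1 = next(i1)
--         except StopIteration:
--             b1 = True
--             i1 = iter(it1)
--             n1 = next(i1)
--         try:
--             n2 = next(i2)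
--         except StopIteration:
--             b2 = True
--             i2 = iter(it2)
--             n2 = next(i2)
--         if b1 and b2:
--             break
--         yield n1, n2
-- ===== SOURCE B (Python) =====
-- def zip_long(it1, it2):
--     # Closed form: element i pairs it1[i % len1] with it2[i % len2],
--     # for i up to max(len1, len2) (the longer side runs once, the shorter cycles).
--     l1 = list(it1)
--     l2 = list(it2)
--     return [(l1[i % len(l1)], l2[i % len(l2)])
--             for i in range(max(len(l1), len(l2)))]
-- ===== Notes on version B (the rewrite author's own statement) =====
-- stated objective: simpler
-- what changed: replaces the dual-iterator while-loop with wrap flags and StopIteration handling by a closed-form comprehension over range(max(len1,len2)) indexing with i % len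
import Mathlib
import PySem

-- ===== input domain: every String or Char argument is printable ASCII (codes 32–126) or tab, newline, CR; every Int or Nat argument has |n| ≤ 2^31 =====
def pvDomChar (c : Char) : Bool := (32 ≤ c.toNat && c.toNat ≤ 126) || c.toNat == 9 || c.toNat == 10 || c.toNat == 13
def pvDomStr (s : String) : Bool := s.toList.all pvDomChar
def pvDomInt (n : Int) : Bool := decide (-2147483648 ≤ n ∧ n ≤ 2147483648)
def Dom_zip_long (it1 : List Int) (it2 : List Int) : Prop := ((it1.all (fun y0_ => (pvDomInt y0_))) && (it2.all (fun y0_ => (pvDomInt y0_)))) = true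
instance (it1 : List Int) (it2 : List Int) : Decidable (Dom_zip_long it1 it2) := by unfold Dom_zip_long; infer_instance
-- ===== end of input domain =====

-- B is a closed-form comprehension with modular indices instead of A's dual-iterator
-- while-loop with wrap flags; same cost, simpler (objective: simpler).

-- ===== PORT A =====
-- next(i) with the except-StopIteration wrap: from the remaining list r, else restart
-- from src setting the wrap flag; none = a second StopIteration (Python: RuntimeError).
def zipPull (src : List Int) (r : List Int) (b : Bool) : Option (Int × List Int × Bool) :=
  match r with
  | x :: xs => some (x, xs, b)
  | [] =>
    match src with
    | y :: ys => some (y, ys, true)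
    | [] => none

-- The while-True loop; fuel bounds the iteration count (the loop runs at most
-- max(len1,len2)+1 times, so the fuel supplied below is never exhausted).
def zipLongLoop (it1 it2 : List Int) :
    Nat → List Int → List Int → Bool → Bool → List (Int × Int) → List (Int × Int)
  | 0, _, _, _, _, acc => acc.reverse
  | fuel + 1, r1, r2, b1, b2, acc =>
    match zipPull it1 r1 b1 with
    | none => acc.reverse   -- Python raises RuntimeError here; excluded by Pre_
    | some (n1, r1', b1') =>
      match zipPull it2 r2 b2 with
      | none => acc.reverse -- Python raises RuntimeError here; excluded by Pre_
      | some (n2, r2', b2') =>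
        if b1' && b2' then acc.reverse
        else zipLongLoop it1 it2 fuel r1' r2' b1' b2' ((n1, n2) :: acc)

def zip_long (it1 : List Int) (it2 : List Int) : List (Int × Int) :=
  zipLongLoop it1 it2 (it1.length + it2.length + 2) it1 it2 false false []

-- ===== PORT B =====
-- l[i % len l] is always in range when the list is nonempty, so getD's default is dead.
def zip_long_alt (it1 : List Int) (it2 : List Int) : List (Int × Int) :=
  (List.range (max it1.length it2.length)).map
    (fun i => (it1.getD (i % it1.length) 0, it2.getD (i % it2.length) 0))

-- ===== PRECONDITION & SPEC =====
-- A (as a generator) raises RuntimeError when either input is empty: excluded.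
def Pre_zip_long (it1 : List Int) (it2 : List Int) : Prop := it1 ≠ [] ∧ it2 ≠ []
instance (it1 : List Int) (it2 : List Int) : Decidable (Pre_zip_long it1 it2) := by
  unfold Pre_zip_long; infer_instance
def pvWitness_zip_long : List Int × List Int := ([1, 2], [5, 6, 7])

def Spec_zip_long (it1 : List Int) (it2 : List Int) (out : List (Int × Int)) : Prop :=
  out = zip_long_alt it1 it2
instance (it1 : List Int) (it2 : List Int) (out : List (Int × Int)) :
    Decidable (Spec_zip_long it1 it2 out) := by unfold Spec_zip_long; infer_instance

-- ===== CLAIM (what is proved, stated in full; the proofs are below) =====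
def Claim_equal_zip_long : Prop := ∀ (it1 : List Int) (it2 : List Int),
  Dom_zip_long it1 it2 → Pre_zip_long it1 it2 → Spec_zip_long it1 it2 (zip_long it1 it2)
-- ===== LEMMAS AND PROOFS =====

-- One next()-with-wrap step: from cursor c (1 ≤ c ≤ len, c ≡ i mod len) the pull
-- yields l[i % len], a new cursor c' ≡ i+1, and the flag for i+1.
lemma side_step (l : List Int) (hl : l ≠ []) (i c : Nat)
    (hc1 : 1 ≤ c) (hcm : c ≤ l.length) (hmod : c % l.length = i % l.length) (hi : 1 ≤ i) :
    ∃ c', zipPull l (l.drop c) (decide (l.length < i)) =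
        some (l.getD (i % l.length) 0, l.drop c', decide (l.length < i + 1)) ∧
      1 ≤ c' ∧ c' ≤ l.length ∧ c' % l.length = (i + 1) % l.length := by
  have hlen : 0 < l.length := List.length_pos_iff.mpr hl
  by_cases hlt : c < l.length
  · refine ⟨c + 1, ?_, by omega, by omega, ?_⟩
    · have him : i % l.length = c := by
        rw [← hmod, Nat.mod_eq_of_lt hlt]
      have hine : i ≠ l.length := by
        intro hEq
        rw [hEq, Nat.mod_self] at him
        omega
      have hflag : decide (l.length < i) = decide (l.length < i + 1) := by
        simp only [decide_eq_decide]
        omega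
      rw [List.drop_eq_getElem_cons hlt, him,
        List.getD_eq_getElem l 0 hlt, hflag]
      rfl
    · rw [Nat.add_mod c 1, Nat.add_mod i 1, hmod]
  · have hceq : c = l.length := by omega
    have him : i % l.length = 0 := by rw [← hmod, hceq, Nat.mod_self]
    have hile : l.length ≤ i := Nat.le_of_dvd (by omega) (Nat.dvd_of_mod_eq_zero him)
    refine ⟨1, ?_, by omega, by omega, ?_⟩
    · cases l with
      | nil => exact absurd rfl hl
      | cons y ys =>
        rw [hceq, List.drop_length, him]
        simp only [List.length_cons] at hile
        simp [zipPull]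
        omega
    · rw [Nat.add_mod i 1, him]
      simp

-- Loop invariant: at the start of iteration i ≥ 1 the remaining lists are drops at
-- cursors c1, c2 congruent to i modulo the lengths, and the wrap flags say whether a
-- wrap has already happened (len < i).
lemma zipLongLoop_inv (it1 it2 : List Int) (h1 : it1 ≠ []) (h2 : it2 ≠ []) :
    ∀ (fuel i c1 c2 : Nat) (acc : List (Int × Int)),
      1 ≤ i → i ≤ max it1.length it2.length →
      max it1.length it2.length + 1 ≤ i + fuel →
      1 ≤ c1 → c1 ≤ it1.length → c1 % it1.length = i % it1.length →
      1 ≤ c2 → c2 ≤ it2.length → c2 % it2.length = i % it2.length →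
      zipLongLoop it1 it2 fuel (it1.drop c1) (it2.drop c2)
          (decide (it1.length < i)) (decide (it2.length < i)) acc
        = acc.reverse ++ (List.range' i (max it1.length it2.length - i)).map
            (fun j => (it1.getD (j % it1.length) 0, it2.getD (j % it2.length) 0)) := by
  intro fuel
  induction fuel with
  | zero =>
    intro i c1 c2 acc hi1 hiM hfuel
    omega
  | succ fuel ih =>
    intro i c1 c2 acc hi1 hiM hfuel hc11 hc1m hc1mod hc21 hc2n hc2mod
    obtain ⟨c1', he1, hc11', hc1m', hc1mod'⟩ := side_step it1 h1 i c1 hc11 hc1m hc1mod hi1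
    obtain ⟨c2', he2, hc21', hc2n', hc2mod'⟩ := side_step it2 h2 i c2 hc21 hc2n hc2mod hi1
    by_cases hend : i = max it1.length it2.length
    · have hb1 : decide (it1.length < i + 1) = true := by
        simp only [decide_eq_true_eq]
        omega
      have hb2 : decide (it2.length < i + 1) = true := by
        simp only [decide_eq_true_eq]
        omega
      simp only [zipLongLoop, he1, he2, hb1, hb2, Bool.and_self, if_true]
      simp [hend]
    · have hor : i < it1.length ∨ i < it2.length := by omega
      have hbreak : (decide (it1.length < i + 1) && decide (it2.length < i + 1)) = false := by
        rcases hor with h | h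
        · simp [show ¬ it1.length < i + 1 by omega]
        · simp [show ¬ it2.length < i + 1 by omega]
      simp only [zipLongLoop, he1, he2, hbreak, Bool.false_eq_true, if_false]
      rw [ih (i + 1) c1' c2' _ (by omega) (by omega) (by omega)
        hc11' hc1m' hc1mod' hc21' hc2n' hc2mod']
      have hsub : max it1.length it2.length - i = (max it1.length it2.length - (i + 1)) + 1 := by
        omega
      rw [hsub, List.range'_succ]
      simp

-- ===== VERDICT (by name: the statement is the Claim_ definition above) =====
theorem zip_long_spec : Claim_equal_zip_long := by
  intro it1 it2 _ hpre
  obtain ⟨h1, h2⟩ := hpre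
  obtain ⟨x, xs, rfl⟩ := List.exists_cons_of_ne_nil h1
  obtain ⟨y, ys, rfl⟩ := List.exists_cons_of_ne_nil h2
  have hm : 0 < (x :: xs).length := List.length_pos_iff.mpr h1
  have hn : 0 < (y :: ys).length := List.length_pos_iff.mpr h2
  unfold Spec_zip_long zip_long zip_long_alt
  -- iteration 0: both pulls succeed from the full lists, flags stay false, yield (x, y)
  have hstep : zipLongLoop (x :: xs) (y :: ys)
      ((x :: xs).length + (y :: ys).length + 2) (x :: xs) (y :: ys) false false []
      = zipLongLoop (x :: xs) (y :: ys)
          ((x :: xs).length + (y :: ys).length + 1) xs ys false false [(x, y)] := rfl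
  have hinv := zipLongLoop_inv (x :: xs) (y :: ys) h1 h2
      ((x :: xs).length + (y :: ys).length + 1) 1 1 1 [(x, y)]
      (by omega) (by omega) (by omega)
      (by omega) (by omega) rfl (by omega) (by omega) rfl
  rw [show (x :: xs).drop 1 = xs from rfl, show (y :: ys).drop 1 = ys from rfl,
    show decide ((x :: xs).length < 1) = false from by simp,
    show decide ((y :: ys).length < 1) = false from by simp] at hinv
  rw [hstep, hinv, List.range_eq_range',
    show max (x :: xs).length (y :: ys).length
      = (max (x :: xs).length (y :: ys).length - 1) + 1 from by omega,
    List.range'_succ]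
  simp
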